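-- pv_equiv track=rewrite | github.com/BGSU-RNA/RNA-3D-correspondence | app/RPFAM.py | convert_loop_id_to_unit_ids
-- ===== SOURCE A (Python) =====
-- def convert_loop_id_to_unit_ids(loop_id,unit_id_string,border_string):
--     """
--     convert an individual loop id to ranges of unit ids
--
--     loop_id is a BGSU RNA loop id like HL_1S72_001 or IL_1S72_003
--     unit_id_list is the list of unit ids for that loop, already retrieved
--
--     For HL, return a list with one string with unit ids separated by colons.
--     For IL, J3, etc., return a list with one string for each strand.
--     """
--
--     if loop_id.startswith("HL"):
--         unit_ids = [unit_id_string.replace(",",":")]  # list of one text string separated by :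
--
--     else:
--         unit_ids = []                # list of unit ids or ranges of unit ids
--
--         unit_id_list = unit_id_string.split(",")
--         border_list = [int(b) for b in border_string.split(",")]
--
--         unit_id = unit_id_list[0]    # current string being built
--         border_total = 1             # how many border nucleotides have been hit
--
--         for i in range(1,len(unit_id_list)):
--
--             if border_total % 2 == 1:
--                 unit_id += ":" + unit_id_list[i]      # connect with : to indicate a range
--             else:
--                 unit_ids.append(unit_id)      # end current string and append to list
--                 unit_id = unit_id_list[i]     # non-consecutive, start new string
--
--             border_total += border_list[i]
--
--         unit_ids.append(unit_id)              # append last id or range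
--
--     return unit_ids
-- ===== SOURCE B (Python) =====
-- def convert_loop_id_to_unit_ids(loop_id, unit_id_string, border_string):
--     if loop_id.startswith("HL"):
--         return [unit_id_string.replace(",", ":")]
--
--     unit_id_list = unit_id_string.split(",")
--     border_list = [int(b) for b in border_string.split(",")]
--     n = len(unit_id_list)
--
--     # a new strand starts at index i exactly when the border count seen
--     # strictly before i (counting an implicit initial border) is even
--     cuts = [0] + [i for i in range(1, n) if (1 + sum(border_list[1:i])) % 2 == 0] + [n]
--
--     # partition the unit list at the cut points and join each segment
--     return [":".join(unit_id_list[a:b]) for a, b in zip(cuts, cuts[1:])]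
-- ===== Notes on version B (the rewrite author's own statement) =====
-- stated objective: alternative
-- what changed: Replaces A's single loop with a running border total, incremental string concatenation and a current-strand accumulator by a declarative compute-then-partition scheme: the strand cut points are read off with a comprehension (an index i is a cut iff 1 + sum(border_list[1:i]) is even), then the unit list is sliced at the cut points and each segment joined.
-- outside the precondition, e.g. on convert_loop_id_to_unit_ids('IL_1S72_003', 'a,b', 'x'): A raises ValueError, B raises ValueError; on convert_loop_id_to_unit_ids('IL_1S72_003', 'a,b', '0'): A raises IndexError, B returns ['a:b']
import Mathlib
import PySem

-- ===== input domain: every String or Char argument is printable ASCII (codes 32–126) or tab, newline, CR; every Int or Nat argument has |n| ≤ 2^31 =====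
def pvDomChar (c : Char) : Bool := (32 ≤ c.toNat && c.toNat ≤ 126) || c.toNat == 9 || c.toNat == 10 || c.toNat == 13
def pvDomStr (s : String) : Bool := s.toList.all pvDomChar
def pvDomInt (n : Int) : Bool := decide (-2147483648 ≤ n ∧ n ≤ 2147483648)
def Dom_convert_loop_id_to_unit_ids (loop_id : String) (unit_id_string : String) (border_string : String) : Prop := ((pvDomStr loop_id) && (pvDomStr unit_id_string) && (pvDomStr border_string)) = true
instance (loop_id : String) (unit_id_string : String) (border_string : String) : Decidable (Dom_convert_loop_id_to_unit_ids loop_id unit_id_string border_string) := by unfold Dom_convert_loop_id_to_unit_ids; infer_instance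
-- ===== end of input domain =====

-- B replaces A's single accumulator loop (incremental string concatenation) by a declarative
-- compute-cut-points-then-partition decomposition: the strand cut points are the indices whose
-- prefix border count is even, read off directly with a comprehension over prefix sums; then the
-- unit list is sliced at the cut points and each segment joined (same cost; objective: alternative).

-- ===== PORT A =====
-- loop body of A: one iteration of `for i in range(1, len(unit_id_list))`
def pvStepA (unit_id_list : List String) (border_list : List Int)
    (st : List String × String × Int) (i : Int) : List String × String × Int :=
  let st' :=
    if PySem.Int.mod st.2.2 2 == 1 then
      (st.1, st.2.1 ++ ":" ++ PySem.List.pyGetD unit_id_list i "", st.2.2)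
    else
      (st.1 ++ [st.2.1], PySem.List.pyGetD unit_id_list i "", st.2.2)
  (st'.1, st'.2.1, st'.2.2 + PySem.List.pyGetD border_list i 0)

def convert_loop_id_to_unit_ids (loop_id : String) (unit_id_string : String) (border_string : String) : List String :=
  if PySem.Str.startswith loop_id "HL" then
    [PySem.Str.replace unit_id_string "," ":"]
  else
    -- sep "," ≠ "", so split? is always `some`; int(b) raises ValueError on a non-integer piece and a short
    -- border list raises IndexError — Pre_ excludes both, so the `.getD` defaults are never reached inside Pre_
    let unit_id_list := (PySem.Str.split? unit_id_string ",").getD []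
    let border_list := ((PySem.Str.split? border_string ",").getD []).map (fun b => (PySem.Int.ofStr? b).getD 0)
    let st := (PySem.List.pyRange 1 (unit_id_list.length : Int)).foldl
        (pvStepA unit_id_list border_list)
        ([], PySem.List.pyGetD unit_id_list 0 "", 1)
    st.1 ++ [st.2.1]

-- ===== PORT B =====
def convert_loop_id_to_unit_ids_alt (loop_id : String) (unit_id_string : String) (border_string : String) : List String :=
  if PySem.Str.startswith loop_id "HL" then
    [PySem.Str.replace unit_id_string "," ":"]
  else
    let ul := (PySem.Str.split? unit_id_string ",").getD []
    let bl := ((PySem.Str.split? border_string ",").getD []).map (fun b => (PySem.Int.ofStr? b).getD 0)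
    let n : Int := ul.length
    -- cuts = [0] + [i for i in range(1, n) if (1 + sum(border_list[1:i])) % 2 == 0] + [n]
    let cuts := [0] ++ ((PySem.List.pyRange 1 n).filter
        (fun i => PySem.Int.mod (1 + (PySem.List.slice bl (some 1) (some i)).sum) 2 == 0)) ++ [n]
    -- [":".join(unit_id_list[a:b]) for a, b in zip(cuts, cuts[1:])]
    (cuts.zip (PySem.List.slice cuts (some 1))).map
      (fun p => PySem.Str.join ":" (PySem.List.slice ul (some p.1) (some p.2)))

-- ===== PRECONDITION & SPEC =====
-- Pre_ excludes exactly the inputs where Python A raises: in the non-HL branch, a border piece that is not a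
-- valid int literal (ValueError) or a border list shorter than the unit id list (IndexError at border_list[i]).
def Pre_convert_loop_id_to_unit_ids (loop_id : String) (unit_id_string : String) (border_string : String) : Prop :=
  PySem.Str.startswith loop_id "HL" = true ∨
  ((∀ b ∈ (PySem.Str.split? border_string ",").getD [], (PySem.Int.ofStr? b).isSome = true) ∧
   ((PySem.Str.split? unit_id_string ",").getD []).length ≤ ((PySem.Str.split? border_string ",").getD []).length)
instance (loop_id : String) (unit_id_string : String) (border_string : String) : Decidable (Pre_convert_loop_id_to_unit_ids loop_id unit_id_string border_string) := by unfold Pre_convert_loop_id_to_unit_ids; infer_instance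

def pvWitness_convert_loop_id_to_unit_ids : String × String × String := ("IL_1S72_003", "a,b,c", "0,1,1")

def Spec_convert_loop_id_to_unit_ids (loop_id : String) (unit_id_string : String) (border_string : String) (out : List String) : Prop := out = convert_loop_id_to_unit_ids_alt loop_id unit_id_string border_string
instance (loop_id : String) (unit_id_string : String) (border_string : String) (out : List String) : Decidable (Spec_convert_loop_id_to_unit_ids loop_id unit_id_string border_string out) := by unfold Spec_convert_loop_id_to_unit_ids; infer_instance

-- ===== CLAIM (what is proved, stated in full; the proofs are below) =====
def Claim_equal_convert_loop_id_to_unit_ids : Prop := ∀ (loop_id : String) (unit_id_string : String) (border_string : String), Dom_convert_loop_id_to_unit_ids loop_id unit_id_string border_string → Pre_convert_loop_id_to_unit_ids loop_id unit_id_string border_string → Spec_convert_loop_id_to_unit_ids loop_id unit_id_string border_string (convert_loop_id_to_unit_ids loop_id unit_id_string border_string)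

-- ===== LEMMAS AND PROOFS =====

-- proof-side intermediate: the cut points written as a left fold (bridges A's loop to B's comprehension)
def pvStepB (border_list : List Int) (st : List Int × Int) (i : Int) : List Int × Int :=
  ((if PySem.Int.mod st.2 2 == 0 then st.1 ++ [i] else st.1),
   st.2 + PySem.List.pyGetD border_list i 0)

-- one joined segment ul[s:e], as B writes it
def pvSeg (ul : List String) (s e : Int) : String :=
  PySem.Str.join ":" (PySem.List.slice ul (some s) (some e))

-- adjacent-pairs join, recursive form
def pvPj (ul : List String) : List Int → List String
  | a :: b :: rest => pvSeg ul a b :: pvPj ul (b :: rest)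
  | _ => []

lemma pvPJ_eq (ul : List String) (l : List Int) :
    (l.zip (PySem.List.slice l (some 1))).map
      (fun p => PySem.Str.join ":" (PySem.List.slice ul (some p.1) (some p.2))) = pvPj ul l := by
  rw [PySem.List.slice_from_one]
  induction l with
  | nil => rfl
  | cons a l ih =>
    cases l with
    | nil => rfl
    | cons b rest => simpa [pvPj, pvSeg] using ih

lemma pvPj_snoc (ul : List String) (a b : Int) (xs : List Int) :
    pvPj ul (xs ++ [a, b]) = pvPj ul (xs ++ [a]) ++ [pvSeg ul a b] := by
  induction xs with
  | nil => rfl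
  | cons x xs ih =>
    cases xs with
    | nil => rfl
    | cons y ys => simp only [List.cons_append, pvPj] at ih ⊢; rw [ih]

lemma pvJoin_nil (sep : String) : PySem.Str.join sep [] = "" := by
  apply String.toList_inj.mp
  simp [PySem.Str.toList_join, PySem.Chars.join_nil]

lemma pvJoin_singleton (sep x : String) : PySem.Str.join sep [x] = x := by
  apply String.toList_inj.mp
  simp [PySem.Str.toList_join, PySem.Chars.join_singleton]

lemma pvChars_join_snoc (sep x p : List Char) (l : List (List Char)) :
    PySem.Chars.join sep (p :: (l ++ [x])) = PySem.Chars.join sep (p :: l) ++ (sep ++ x) := by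
  induction l generalizing p with
  | nil => simp [PySem.Chars.join_cons_cons, PySem.Chars.join_singleton, List.append_assoc]
  | cons q l ih =>
    simp only [List.cons_append, PySem.Chars.join_cons_cons, ih q]
    simp [List.append_assoc]

lemma pvJoin_snoc (sep x p : String) (l : List String) :
    PySem.Str.join sep ((p :: l) ++ [x]) = PySem.Str.join sep (p :: l) ++ sep ++ x := by
  apply String.toList_inj.mp
  simp [PySem.Str.toList_join, pvChars_join_snoc]

lemma pvSeg_single (ul : List String) (i : Int) (h0 : 0 ≤ i) (h1 : i < (ul.length : Int)) :
    pvSeg ul i (i + 1) = PySem.List.pyGetD ul i "" := by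
  have hi : i.toNat < ul.length := by omega
  have htake : List.take 1 (List.drop i.toNat ul) = [ul[i.toNat]] := by
    rw [List.drop_eq_getElem_cons hi]; rfl
  rw [pvSeg, PySem.List.slice_toNat _ h0 (by omega),
      show (i + 1).toNat - i.toNat = 1 by omega, htake, pvJoin_singleton,
      PySem.List.pyGetD_eq_getElem ul "" h0 h1]

lemma pvSeg_extend (ul : List String) (s i : Int) (h0 : 0 ≤ s) (hsi : s < i)
    (hi : i < (ul.length : Int)) :
    pvSeg ul s i ++ ":" ++ PySem.List.pyGetD ul i "" = pvSeg ul s (i + 1) := by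
  have hiN : i.toNat < ul.length := by omega
  have hslice : PySem.List.slice ul (some s) (some (i + 1))
      = PySem.List.slice ul (some s) (some i) ++ [ul[i.toNat]] := by
    rw [PySem.List.slice_toNat _ h0 (by omega), PySem.List.slice_toNat _ h0 (by omega),
        show (i + 1).toNat - s.toNat = (i.toNat - s.toNat) + 1 by omega, List.take_add_one]
    have hlt : i.toNat - s.toNat < (ul.drop s.toNat).length := by
      simp; omega
    simp [List.getElem?_eq_getElem hlt, List.getElem_drop,
          show s.toNat + (i.toNat - s.toNat) = i.toNat by omega]
  have hne : ∃ p l, PySem.List.slice ul (some s) (some i) = p :: l := by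
    have : (PySem.List.slice ul (some s) (some i)).length ≠ 0 := by
      rw [PySem.List.slice_toNat _ h0 (by omega)]
      simp [List.length_take, List.length_drop]; omega
    cases hsl : PySem.List.slice ul (some s) (some i) with
    | nil => rw [hsl] at this; simp at this
    | cons p l => exact ⟨p, l, rfl⟩
  obtain ⟨p, l, hpl⟩ := hne
  rw [pvSeg, pvSeg, hslice, hpl, pvJoin_snoc,
      PySem.List.pyGetD_eq_getElem ul "" (by omega) hi]

-- run of A's loop from index i for k steps, as a pure recursion
def pvGA (ul : List String) (bl : List Int) : Nat → Int → String → Int → List String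
  | 0, _, uid, _ => [uid]
  | (k+1), i, uid, t =>
    if PySem.Int.mod t 2 == 1 then
      pvGA ul bl k (i+1) (uid ++ ":" ++ PySem.List.pyGetD ul i "") (t + PySem.List.pyGetD bl i 0)
    else
      uid :: pvGA ul bl k (i+1) (PySem.List.pyGetD ul i "") (t + PySem.List.pyGetD bl i 0)

-- run of the fold-form cut pass from index i for k steps, already turned into joined segments
def pvGB (ul : List String) (bl : List Int) : Nat → Int → Int → Int → List String
  | 0, i, s, _ => [pvSeg ul s i]
  | (k+1), i, s, t =>
    if PySem.Int.mod t 2 == 0 then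
      pvSeg ul s i :: pvGB ul bl k (i+1) i (t + PySem.List.pyGetD bl i 0)
    else
      pvGB ul bl k (i+1) s (t + PySem.List.pyGetD bl i 0)

lemma pvLA (ul : List String) (bl : List Int) (k : Nat) :
    ∀ (i : Int) (uids : List String) (uid : String) (t : Int),
    (((PySem.List.pyRange i (i + (k : Int))).foldl (pvStepA ul bl) (uids, uid, t)).1
      ++ [((PySem.List.pyRange i (i + (k : Int))).foldl (pvStepA ul bl) (uids, uid, t)).2.1])
    = uids ++ pvGA ul bl k i uid t := by
  induction k with
  | zero => intro i uids uid t; rw [PySem.List.pyRange_one_eq_nil (by omega)]; rfl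
  | succ k ih =>
    intro i uids uid t
    rw [show i + ((k + 1 : Nat) : Int) = (i + 1) + (k : Int) by push_cast; omega,
        PySem.List.pyRange_one_cons (by omega), List.foldl_cons]
    by_cases h : PySem.Int.mod t 2 == 1
    · simp only [pvStepA, h, if_pos, pvGA, ih]
    · simp only [pvStepA, h, Bool.false_eq_true, ite_false, pvGA, ih,
        List.append_assoc, List.cons_append, List.nil_append]

lemma pvLB (ul : List String) (bl : List Int) (k : Nat) :
    ∀ (i : Int) (starts : List Int) (s t : Int),
    pvPj ul (((PySem.List.pyRange i (i + (k : Int))).foldl (pvStepB bl) (starts ++ [s], t)).1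
      ++ [i + (k : Int)])
    = pvPj ul (starts ++ [s]) ++ pvGB ul bl k i s t := by
  induction k with
  | zero =>
    intro i starts s t
    rw [PySem.List.pyRange_one_eq_nil (by omega)]
    simp only [List.foldl_nil, Nat.cast_zero, add_zero, List.append_assoc, List.cons_append,
      List.nil_append]
    rw [pvPj_snoc]
    rfl
  | succ k ih =>
    intro i starts s t
    rw [show i + ((k + 1 : Nat) : Int) = (i + 1) + (k : Int) by push_cast; omega,
        PySem.List.pyRange_one_cons (by omega), List.foldl_cons]
    by_cases h : PySem.Int.mod t 2 == 0
    · simp only [pvStepB, h, if_pos]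
      rw [show starts ++ [s] ++ [i] = (starts ++ [s]) ++ [i] by simp, ih, pvGB, if_pos h,
          show starts ++ [s] ++ [i] = starts ++ [s, i] by simp, pvPj_snoc]
      simp
    · simp only [pvStepB, h, Bool.false_eq_true, ite_false]
      rw [ih, pvGB, if_neg (by simpa using h)]

lemma pvMod2 (t : Int) : PySem.Int.mod t 2 = 0 ∨ PySem.Int.mod t 2 = 1 := by
  have h1 := PySem.Int.mod_nonneg t (by omega : (0:Int) < 2)
  have h2 := PySem.Int.mod_lt t (by omega : (0:Int) < 2)
  omega

lemma pvL3 (ul : List String) (bl : List Int) (k : Nat) :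
    ∀ (i s t : Int), 0 ≤ s → s < i → i + (k : Int) ≤ (ul.length : Int) →
    pvGA ul bl k i (pvSeg ul s i) t = pvGB ul bl k i s t := by
  induction k with
  | zero => intro i s t _ _ _; rfl
  | succ k ih =>
    intro i s t h0 hsi hlen
    have hi : i < (ul.length : Int) := by push_cast at hlen; omega
    rcases pvMod2 t with h | h
    · rw [pvGA, if_neg (by rw [h]; decide), pvGB, if_pos (by rw [h]; decide),
          ← pvSeg_single ul i (by omega) hi]
      exact congrArg _ (ih (i+1) i _ (by omega) (by omega) (by push_cast at hlen ⊢; omega))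
    · rw [pvGA, if_pos (by rw [h]; decide), pvGB, if_neg (by rw [h]; decide),
          pvSeg_extend ul s i h0 hsi hi]
      exact ih (i+1) s _ h0 (by omega) (by push_cast at hlen ⊢; omega)

-- the running border total equals 1 + sum of the prefix slice bl[1:i]
lemma pvSumExt (bl : List Int) (i : Int) (h : 1 ≤ i) :
    (PySem.List.slice bl (some 1) (some (i + 1))).sum
      = (PySem.List.slice bl (some 1) (some i)).sum + PySem.List.pyGetD bl i 0 := by
  rw [PySem.List.slice_toNat _ (by omega) (by omega),
      PySem.List.slice_toNat _ (by omega) (by omega)]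
  simp only [Int.toNat_one]
  by_cases hi : i < (bl.length : Int)
  · have hiN : i.toNat < bl.length := by omega
    rw [show (i + 1).toNat - 1 = (i.toNat - 1) + 1 by omega, List.take_add_one]
    have hlt : i.toNat - 1 < (bl.drop 1).length := by simp; omega
    rw [List.getElem?_eq_getElem hlt]
    simp only [List.getElem_drop, show 1 + (i.toNat - 1) = i.toNat by omega]
    rw [PySem.List.pyGetD_eq_getElem bl 0 (by omega) hi]
    simp
  · have hlen : bl.length ≤ i.toNat := by omega
    have hbig : ∀ m : Nat, bl.length - 1 ≤ m → (bl.drop 1).take m = bl.drop 1 := by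
      intro m hm; exact List.take_of_length_le (by simp; omega)
    rw [hbig _ (by omega), hbig _ (by omega)]
    have hnone : PySem.List.pyGetD bl i 0 = 0 := by
      simp [PySem.List.pyGetD, PySem.List.pyIdx?, PySem.List.pyGet?, if_neg hi,
            if_pos (show (0:Int) ≤ i by omega)]
    rw [hnone, add_zero]

-- the fold-form cut pass produces exactly B's filtered cut points
lemma pvFilter (bl : List Int) (k : Nat) :
    ∀ (i : Int) (starts : List Int), 1 ≤ i →
    ((PySem.List.pyRange i (i + (k : Int))).foldl (pvStepB bl)
        (starts, 1 + (PySem.List.slice bl (some 1) (some i)).sum)).1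
    = starts ++ (PySem.List.pyRange i (i + (k : Int))).filter
        (fun j => PySem.Int.mod (1 + (PySem.List.slice bl (some 1) (some j)).sum) 2 == 0) := by
  induction k with
  | zero => intro i starts _; rw [PySem.List.pyRange_one_eq_nil (by omega)]; simp
  | succ k ih =>
    intro i starts hi
    rw [show i + ((k + 1 : Nat) : Int) = (i + 1) + (k : Int) by push_cast; omega,
        PySem.List.pyRange_one_cons (by omega), List.foldl_cons, List.filter_cons]
    have hstep : pvStepB bl (starts, 1 + (PySem.List.slice bl (some 1) (some i)).sum) i
        = ((if PySem.Int.mod (1 + (PySem.List.slice bl (some 1) (some i)).sum) 2 == 0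
              then starts ++ [i] else starts),
           1 + (PySem.List.slice bl (some 1) (some (i + 1))).sum) := by
      rw [pvStepB, pvSumExt bl i hi]; ring_nf
    rw [hstep]
    by_cases h : PySem.Int.mod (1 + (PySem.List.slice bl (some 1) (some i)).sum) 2 == 0
    · rw [if_pos h, if_pos h, ih (i + 1) (starts ++ [i]) (by omega)]
      simp
    · rw [if_neg h, if_neg h, ih (i + 1) starts (by omega)]

lemma pvCuts (ul : List String) (bl : List Int) :
    [0] ++ ((PySem.List.pyRange 1 (ul.length : Int)).filter
        (fun i => PySem.Int.mod (1 + (PySem.List.slice bl (some 1) (some i)).sum) 2 == 0))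
    = ((PySem.List.pyRange 1 (ul.length : Int)).foldl (pvStepB bl) ([0], 1)).1 := by
  have hnil : PySem.List.slice bl (some 1) (some 1) = [] := by
    rw [PySem.List.slice_toNat _ (by omega) (by omega)]; simp
  by_cases hn : (ul.length : Int) ≤ 1
  · rw [PySem.List.pyRange_one_eq_nil hn]; simp
  · have hk : 1 + ((ul.length - 1 : Nat) : Int) = (ul.length : Int) := by omega
    have := pvFilter bl (ul.length - 1) 1 [0] (le_refl 1)
    rw [hk, hnil] at this
    simpa using this.symm

lemma pvMain (ul : List String) (bl : List Int) :
    (((PySem.List.pyRange 1 (ul.length : Int)).foldl (pvStepA ul bl)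
        ([], PySem.List.pyGetD ul 0 "", 1)).1
      ++ [((PySem.List.pyRange 1 (ul.length : Int)).foldl (pvStepA ul bl)
        ([], PySem.List.pyGetD ul 0 "", 1)).2.1])
    = ((((PySem.List.pyRange 1 (ul.length : Int)).foldl (pvStepB bl) ([0], 1)).1
          ++ [(ul.length : Int)]).zip
        (PySem.List.slice (((PySem.List.pyRange 1 (ul.length : Int)).foldl (pvStepB bl) ([0], 1)).1
          ++ [(ul.length : Int)]) (some 1))).map
      (fun p => PySem.Str.join ":" (PySem.List.slice ul (some p.1) (some p.2))) := by
  rw [pvPJ_eq]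
  cases ul with
  | nil =>
    rw [show ((List.length ([] : List String) : Int)) = 0 by simp,
        PySem.List.pyRange_one_eq_nil (by omega)]
    simp [pvPj, pvSeg, PySem.List.pyGetD, PySem.List.pyIdx?, PySem.List.pyGet?, pvJoin_nil,
          PySem.List.slice]
  | cons u0 rest =>
    set l := u0 :: rest with hl
    have hlen : 1 ≤ l.length := by simp [hl]
    have h1 : (1:Int) + ((l.length - 1 : Nat) : Int) = (l.length : Int) := by omega
    have eA := pvLA l bl (l.length - 1) 1 [] (PySem.List.pyGetD l 0 "") 1
    have eB := pvLB l bl (l.length - 1) 1 [] 0 1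
    rw [h1] at eA eB
    simp only [List.nil_append] at eA eB
    rw [eA, eB, show pvPj l [0] = [] from rfl, List.nil_append,
        show PySem.List.pyGetD l 0 "" = pvSeg l 0 1 from
          (pvSeg_single l 0 (by omega) (by exact_mod_cast hlen)).symm.trans (by norm_num)]
    exact pvL3 l bl (l.length - 1) 1 0 1 (by omega) (by omega) (by omega)

-- ===== VERDICT (by name: the statement is the Claim_ definition above) =====
theorem convert_loop_id_to_unit_ids_spec : Claim_equal_convert_loop_id_to_unit_ids := by
  intro loop_id unit_id_string border_string _dom _pre
  unfold Spec_convert_loop_id_to_unit_ids convert_loop_id_to_unit_ids convert_loop_id_to_unit_ids_alt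
  by_cases hHL : PySem.Str.startswith loop_id "HL"
  · simp only [hHL, if_pos]
  · simp only [hHL, Bool.false_eq_true, ite_false]
    rw [pvCuts]
    exact pvMain _ _
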